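-- pv_equiv track=rewrite | github.com/TPTraber/CellularExplorer | backend/singleCellAuto.py | rule_to_map
-- ===== SOURCE A (Python) =====
-- def rule_to_map(rule_number: int) -> dict[tuple[int, int, int], int]:
--     if not (0 <= rule_number <= 255):
--         raise ValueError("rule_number must be between 0 and 255")
--
--     # rule_number is converted to an 8-bit binary string, where each bit corresponds to a specific neighborhood configuration
--     bits = f"{rule_number:08b}"
--     neighborhoods = [
--         (1, 1, 1),
--         (1, 1, 0),
--         (1, 0, 1),
--         (1, 0, 0),
--         (0, 1, 1),
--         (0, 1, 0),
--         (0, 0, 1),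
--         (0, 0, 0),
--     ]
--     return {n: int(bit) for n, bit in zip(neighborhoods, bits)}
-- ===== SOURCE B (Python) =====
-- def rule_to_map(rule_number: int) -> dict[tuple[int, int, int], int]:
--     if not (0 <= rule_number <= 255):
--         raise ValueError("rule_number must be between 0 and 255")
--     out = {}
--     for a in (1, 0):
--         for b in (1, 0):
--             for c in (1, 0):
--                 out[(a, b, c)] = (rule_number >> (4 * a + 2 * b + c)) & 1
--     return out
-- ===== Notes on version B (the rewrite author's own statement) =====
-- stated objective: idiomatic
-- what changed: B drops the binary-string formatting and the hardcoded neighborhood table: it enumerates the triples with nested loops and extracts each output bit arithmetically as (rule_number >> (4*a+2*b+c)) & 1.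
import Mathlib
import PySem

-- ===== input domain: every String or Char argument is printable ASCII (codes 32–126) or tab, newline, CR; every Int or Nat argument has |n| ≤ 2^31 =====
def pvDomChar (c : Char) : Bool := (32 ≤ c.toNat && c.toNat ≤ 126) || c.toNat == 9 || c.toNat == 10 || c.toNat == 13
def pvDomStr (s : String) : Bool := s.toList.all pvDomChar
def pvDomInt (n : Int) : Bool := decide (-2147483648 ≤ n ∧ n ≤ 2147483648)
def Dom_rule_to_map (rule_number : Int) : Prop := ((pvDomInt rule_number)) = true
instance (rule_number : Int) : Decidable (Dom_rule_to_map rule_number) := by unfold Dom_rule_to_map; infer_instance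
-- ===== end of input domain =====

-- B replaces the binary-string formatting and the hardcoded neighborhood table by nested
-- loops over the triples, extracting each bit arithmetically (idiomatic; same cost).

-- ===== PORT A =====
def rule_to_map (rule_number : Int) : List (Int × Int × Int × Int) :=
  if ¬(0 ≤ rule_number ∧ rule_number ≤ 255) then []  -- Python raises ValueError here; outside Pre_
  else
    -- f"{rule_number:08b}": binary digits zero-padded to width 8, exact for 0 ≤ rule_number ≤ 255
    let digs := PySem.Int.toBinChars rule_number
    let bits := List.replicate (8 - digs.length) '0' ++ digs
    let neighborhoods : List (Int × Int × Int) :=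
      [(1,1,1),(1,1,0),(1,0,1),(1,0,0),(0,1,1),(0,1,0),(0,0,1),(0,0,0)]
    -- {n: int(bit) for n, bit in zip(neighborhoods, bits)} — keys are distinct, so the dict
    -- as an insertion-order association list is exactly this zip; int(bit) never raises here
    (neighborhoods.zip bits).map
      (fun p => (p.1.1, p.1.2.1, p.1.2.2, (PySem.Int.ofChars? [p.2]).getD 0))

-- ===== PORT B =====
def rule_to_map_alt (rule_number : Int) : List (Int × Int × Int × Int) :=
  if ¬(0 ≤ rule_number ∧ rule_number ≤ 255) then []  -- Python raises ValueError here; outside Pre_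
  else
    -- nested for-loops over (1, 0); keys are distinct, so the dict built by the loop is
    -- this insertion-order list; (rule_number >> k) & 1 with k = 4a+2b+c ≥ 0
    ([1, 0] : List Int).flatMap (fun a =>
      ([1, 0] : List Int).flatMap (fun b =>
        ([1, 0] : List Int).map (fun c =>
          (a, b, c, PySem.Int.band (rule_number >>> (4 * a + 2 * b + c).toNat) 1))))

-- ===== PRECONDITION & SPEC =====
-- A raises ValueError outside 0..255; Pre_ excludes exactly those inputs.
def Pre_rule_to_map (rule_number : Int) : Prop := 0 ≤ rule_number ∧ rule_number ≤ 255
instance (rule_number : Int) : Decidable (Pre_rule_to_map rule_number) := by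
  unfold Pre_rule_to_map; infer_instance
def pvWitness_rule_to_map : Int := (30)

def Spec_rule_to_map (rule_number : Int) (out : List (Int × Int × Int × Int)) : Prop :=
  out = rule_to_map_alt rule_number
instance (rule_number : Int) (out : List (Int × Int × Int × Int)) : Decidable (Spec_rule_to_map rule_number out) := by
  unfold Spec_rule_to_map; infer_instance

-- ===== CLAIM (what is proved, stated in full; the proofs are below) =====
def Claim_equal_rule_to_map : Prop := ∀ (rule_number : Int), Dom_rule_to_map rule_number → Pre_rule_to_map rule_number → Spec_rule_to_map rule_number (rule_to_map rule_number)

-- ===== LEMMAS AND PROOFS =====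

-- ===== VERDICT (by name: the statement is the Claim_ definition above) =====
theorem rule_to_map_spec : Claim_equal_rule_to_map := by
  intro n _ hp
  unfold Spec_rule_to_map
  obtain ⟨h0, h255⟩ := hp
  interval_cases n <;> decide
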